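-- pv_equiv track=rewrite | github.com/SimeonBauman/Val-SpreadSheet | ValorantDataScraper/ValorantDataScraper.py | getTeam
-- ===== SOURCE A (Python) =====
-- def getTeam(data, player):
--     i = data.index(player) - 1
--     while (i > 0):
--         if data[i] == "Team A":
--             return "Atk"
--         elif data[i] == "Team B":
--             return "Def"
--         i = i - 1
-- ===== SOURCE B (Python) =====
-- def getTeam(data, player):
--     rev = data[:data.index(player)][::-1]
--     ia = rev.index("Team A") if "Team A" in rev else len(rev)
--     ib = rev.index("Team B") if "Team B" in rev else len(rev)
--     if ia == ib:
--         return None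
--     return "Atk" if ia < ib else "Def"
-- ===== Notes on version B (the rewrite author's own statement) =====
-- stated objective: alternative
-- what changed: Backward short-circuiting index scan replaced by computing the first index of each team marker in the reversed prefix before the player and comparing the two indices (nearest marker wins).
-- intended difference: When the only team marker before the player's first occurrence sits at index 0, A returns None because its loop condition 'i > 0' never inspects index 0; B returns that marker's team ('Atk'/'Def'), the intended nearest-preceding-team answer. — e.g. on getTeam(["Team A", "p"], "p"): A returns none, B returns some "Atk"
import Mathlib
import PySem

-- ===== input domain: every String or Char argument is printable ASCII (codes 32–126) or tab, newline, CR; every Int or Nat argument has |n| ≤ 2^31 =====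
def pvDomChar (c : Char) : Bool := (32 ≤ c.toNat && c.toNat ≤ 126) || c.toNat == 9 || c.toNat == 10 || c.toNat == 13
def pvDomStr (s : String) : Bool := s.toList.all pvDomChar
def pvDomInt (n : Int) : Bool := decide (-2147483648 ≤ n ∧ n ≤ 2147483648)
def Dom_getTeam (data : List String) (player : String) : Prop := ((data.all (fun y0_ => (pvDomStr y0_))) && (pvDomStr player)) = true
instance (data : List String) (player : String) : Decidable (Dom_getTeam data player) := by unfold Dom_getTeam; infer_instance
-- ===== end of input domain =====

-- B replaces A's backward short-circuiting scan with: reverse the prefix before the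
-- player, take the first index of each team marker there, and compare the two indices;
-- A skips index 0 (loop condition 'i > 0'), B inspects it — the one stated intended
-- difference (D_getTeam below).


-- ===== PORT A =====
-- the while loop: i counts down from idx-1; returns on the first marker found
def getTeamLoopA (data : List String) : Nat → Option String
  | 0 => none
  | Nat.succ j =>
      if data.getD (j + 1) "" = "Team A" then some "Atk"
      else if data.getD (j + 1) "" = "Team B" then some "Def"
      else getTeamLoopA data j

def getTeam (data : List String) (player : String) : Option String :=
  match PySem.List.index? data player with
  | none => none   -- Python raises ValueError here; excluded by Pre_getTeam
  | some idx => getTeamLoopA data (idx - 1)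

-- ===== PORT B =====
def getTeam_alt (data : List String) (player : String) : Option String :=
  match PySem.List.index? data player with
  | none => none   -- Python raises ValueError here; excluded by Pre_getTeam
  | some idx =>
      -- rev = data[:idx][::-1]  (slice then reverse, exact for nonnegative idx)
      let rev := (PySem.List.slice data none (some (idx : Int))).reverse
      -- ia = rev.index("Team A") if "Team A" in rev else len(rev)  (index? is some iff member)
      let ia := match PySem.List.index? rev "Team A" with | some i => i | none => rev.length
      let ib := match PySem.List.index? rev "Team B" with | some i => i | none => rev.length
      if ia = ib then none
      else if ia < ib then some "Atk" else some "Def"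

-- ===== PRECONDITION & SPEC =====
-- Pre_ excludes exactly the inputs where data.index(player) raises ValueError in both programs.
def Pre_getTeam (data : List String) (player : String) : Prop := player ∈ data
instance (data : List String) (player : String) : Decidable (Pre_getTeam data player) := by unfold Pre_getTeam; infer_instance
def pvWitness_getTeam : List String × String := (["Team A", "x", "p"], "p")

-- When the only team marker strictly before the player's first occurrence sits at index 0,
-- A returns None (its loop condition 'i > 0' never inspects index 0) while B returns that
-- marker's team ('Atk'/'Def'), the intended nearest-preceding-team answer.
def dCheck (data : List String) (player : String) : Bool :=
  match PySem.List.index? data player with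
  | none => false
  | some idx =>
      decide (1 ≤ idx) &&
      (data.getD 0 "" == "Team A" || data.getD 0 "" == "Team B") &&
      ((List.range idx).all fun j =>
        j == 0 || (data.getD j "" != "Team A" && data.getD j "" != "Team B"))

def D_getTeam (data : List String) (player : String) : Prop := dCheck data player = true
instance (data : List String) (player : String) : Decidable (D_getTeam data player) := by unfold D_getTeam; infer_instance

def Spec_getTeam (data : List String) (player : String) (out : Option String) : Prop :=
  ¬ D_getTeam data player → out = getTeam_alt data player
instance (data : List String) (player : String) (out : Option String) : Decidable (Spec_getTeam data player out) := by unfold Spec_getTeam; infer_instance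

def pvDiffWitness_getTeam : List String × String := (["Team A", "p"], "p")
def pvDiffWitnessOut_getTeam : (Option String) × (Option String) := (none, some "Atk")

-- ===== CLAIM (what is proved, stated in full; the proofs are below) =====
def Claim_unchanged_getTeam : Prop := ∀ (data : List String) (player : String), Dom_getTeam data player → Pre_getTeam data player → Spec_getTeam data player (getTeam data player)
def Claim_changed_getTeam : Prop := Dom_getTeam (pvDiffWitness_getTeam.1) (pvDiffWitness_getTeam.2) ∧ Pre_getTeam (pvDiffWitness_getTeam.1) (pvDiffWitness_getTeam.2) ∧ D_getTeam (pvDiffWitness_getTeam.1) (pvDiffWitness_getTeam.2) ∧ getTeam (pvDiffWitness_getTeam.1) (pvDiffWitness_getTeam.2) = pvDiffWitnessOut_getTeam.1 ∧ getTeam_alt (pvDiffWitness_getTeam.1) (pvDiffWitness_getTeam.2) = pvDiffWitnessOut_getTeam.2 ∧ pvDiffWitnessOut_getTeam.1 ≠ pvDiffWitnessOut_getTeam.2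
def Claim_exact_getTeam : Prop := ∀ (data : List String) (player : String), Dom_getTeam data player → Pre_getTeam data player → D_getTeam data player → getTeam data player ≠ getTeam_alt data player

-- ===== LEMMAS AND PROOFS =====

-- a marker mapped to its team
def mark (x : String) : Option String :=
  if x = "Team A" then some "Atk" else if x = "Team B" then some "Def" else none

-- first index of v in rev, or its length if absent (B's ia/ib)
def idxOr (rev : List String) (v : String) : Nat :=
  match PySem.List.index? rev v with | some i => i | none => rev.length

-- B's core computation on an already-reversed prefix
def bCoreRev (rev : List String) : Option String :=
  if idxOr rev "Team A" = idxOr rev "Team B" then none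
  else if idxOr rev "Team A" < idxOr rev "Team B" then some "Atk" else some "Def"

theorem idxOr_cons_self (x : String) (r : List String) : idxOr (x :: r) x = 0 := by
  unfold idxOr; rw [PySem.List.index?_cons_self]

theorem idxOr_cons_of_ne (x v : String) (r : List String) (h : x ≠ v) :
    idxOr (x :: r) v = idxOr r v + 1 := by
  unfold idxOr
  rw [PySem.List.index?_cons_of_ne r h]
  cases PySem.List.index? r v <;> simp

theorem bCoreRev_nil : bCoreRev [] = none := by decide

theorem bCoreRev_cons (x : String) (r : List String) :
    bCoreRev (x :: r) = match mark x with | some v => some v | none => bCoreRev r := by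
  unfold bCoreRev mark
  by_cases hA : x = "Team A"
  · subst hA
    rw [idxOr_cons_self, idxOr_cons_of_ne _ _ _ (by decide)]
    simp
  · by_cases hB : x = "Team B"
    · subst hB
      rw [idxOr_cons_self, idxOr_cons_of_ne _ _ _ (by decide)]
      simp [hA]
    · rw [idxOr_cons_of_ne _ _ _ hA, idxOr_cons_of_ne _ _ _ hB]
      simp only [hA, hB, if_false]
      split_ifs <;> simp_all

-- take (n+1) appends element n
theorem take_succ_eq (data : List String) (n : Nat) (h : n < data.length) :
    data.take (n + 1) = data.take n ++ [data.getD n ""] := by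
  rw [List.take_add_one, List.getElem?_eq_getElem h, List.getD_eq_getElem data "" h]
  simp

-- the A-loop at n+1 is one mark-step before the loop at n
theorem loopA_succ (data : List String) (n : Nat) :
    getTeamLoopA data (n + 1)
      = match mark (data.getD (n + 1) "") with
        | some v => some v
        | none => getTeamLoopA data n := by
  conv_lhs => rw [getTeamLoopA]
  unfold mark
  split_ifs <;> simp

-- central bridge: B's reversed-prefix computation vs A's backward loop;
-- index 0's contribution survives exactly when the loop found nothing
theorem bCore_eq_loopA (data : List String) (n : Nat) (h : n < data.length) :
    bCoreRev ((data.take (n + 1)).reverse)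
      = match getTeamLoopA data n with
        | some v => some v
        | none => mark (data.getD 0 "") := by
  induction n with
  | zero =>
      rw [take_succ_eq data 0 h]
      rw [List.take_zero, List.nil_append, List.reverse_singleton, bCoreRev_cons]
      simp only [bCoreRev_nil, getTeamLoopA]
      cases mark (data.getD 0 "") <;> rfl
  | succ m ih =>
      have hm : m < data.length := Nat.lt_of_succ_lt h
      rw [take_succ_eq data (m + 1) h, List.reverse_append, List.reverse_singleton,
          List.singleton_append, bCoreRev_cons, ih hm, loopA_succ]
      cases mark (data.getD (m + 1) "") <;> cases getTeamLoopA data m <;> simp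

-- if the backward loop found nothing, no index in 1..n is a marker
theorem loopA_none (data : List String) (n : Nat) (h : getTeamLoopA data n = none) :
    ∀ j, 1 ≤ j → j ≤ n → data.getD j "" ≠ "Team A" ∧ data.getD j "" ≠ "Team B" := by
  induction n with
  | zero => intro j h1 h2; omega
  | succ m ih =>
      intro j h1 h2
      rw [loopA_succ] at h
      by_cases hA : data[m + 1]?.getD "" = "Team A"
      · simp [mark, List.getD, hA] at h
      · by_cases hB : data[m + 1]?.getD "" = "Team B"
        · simp [mark, List.getD, hB] at h
        · have hmk : mark (data.getD (m + 1) "") = none := by simp [mark, List.getD, hA, hB]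
          rw [hmk] at h
          rcases Nat.lt_or_ge j (m + 1) with hj | hj
          · exact ih h j h1 (by omega)
          · have : j = m + 1 := by omega
            subst this; exact ⟨hA, hB⟩

-- converse: no marker in 1..n means the backward loop finds nothing
theorem loopA_none_of (data : List String) (n : Nat)
    (h : ∀ j, 1 ≤ j → j ≤ n → data.getD j "" ≠ "Team A" ∧ data.getD j "" ≠ "Team B") :
    getTeamLoopA data n = none := by
  induction n with
  | zero => rfl
  | succ m ih =>
      rw [loopA_succ]
      have hm := h (m + 1) (by omega) (by omega)
      unfold mark
      rw [if_neg hm.1, if_neg hm.2]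
      exact ih (fun j h1 h2 => h j h1 (by omega))

theorem index?_some_of_mem (data : List String) (player : String) (h : player ∈ data) :
    ∃ k, PySem.List.index? data player = some k ∧ k < data.length := by
  have hs : (PySem.List.index? data player).isSome := (PySem.List.index?_isSome_iff data player).mpr h
  rcases Option.isSome_iff_exists.mp hs with ⟨k, hk⟩
  obtain ⟨hlt, -⟩ := PySem.List.getElem_of_index?_eq_some hk
  exact ⟨k, hk, hlt⟩

-- unfold B's port to its reversed-prefix core
theorem alt_eq_bCore (data : List String) (player : String) (k : Nat)
    (hk : PySem.List.index? data player = some k) :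
    getTeam_alt data player = bCoreRev ((data.take k).reverse) := by
  unfold getTeam_alt bCoreRev
  rw [hk]
  simp only [PySem.List.slice_to_natCast]
  rfl

theorem getTeam_spec : Claim_unchanged_getTeam := by
  intro data player _ hpre hnd
  obtain ⟨k, hk, hklt⟩ := index?_some_of_mem data player hpre
  rw [alt_eq_bCore data player k hk]
  unfold getTeam
  rw [hk]; dsimp only
  cases k with
  | zero => simp [getTeamLoopA, bCoreRev_nil]
  | succ m =>
      have hm : m < data.length := Nat.lt_of_succ_lt hklt
      rw [bCore_eq_loopA data m hm]
      simp only [Nat.succ_sub_one]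
      cases hl : getTeamLoopA data m with
      | some v => simp
      | none =>
          -- ¬D plus "no marker in 1..m" forces data[0] not a marker
          have hnom := loopA_none data m hl
          have hd0 : data.getD 0 "" ≠ "Team A" ∧ data.getD 0 "" ≠ "Team B" := by
            by_contra hc
            apply hnd
            unfold D_getTeam dCheck
            rw [hk]
            simp only [Bool.and_eq_true, decide_eq_true_eq, List.all_eq_true]
            refine ⟨⟨by omega, ?_⟩, ?_⟩
            · rcases not_and_or.mp hc with h0 | h0 <;> simp [not_not.mp (by simpa using h0)]
            · intro j hj
              rcases Nat.eq_zero_or_pos j with h0 | h0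
              · simp [h0]
              · have hjm : j ≤ m := by
                  have := List.mem_range.mp hj; omega
                have := hnom j h0 hjm
                simp only [List.getD] at this
                simp [this.1, this.2, Nat.pos_iff_ne_zero.mp h0]
          have hred : mark (data.getD 0 "") = none := by
            unfold mark
            rw [if_neg hd0.1, if_neg hd0.2]
          exact hred.symm

theorem getTeam_changed : Claim_changed_getTeam := by unfold Claim_changed_getTeam; decide

theorem getTeam_tight : Claim_exact_getTeam := by
  intro data player _ hpre hd
  obtain ⟨k, hk, hklt⟩ := index?_some_of_mem data player hpre
  unfold D_getTeam dCheck at hd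
  rw [hk] at hd
  simp only [Bool.and_eq_true, decide_eq_true_eq, List.all_eq_true] at hd
  obtain ⟨⟨hk1, hmark⟩, hnone⟩ := hd
  rw [alt_eq_bCore data player k hk]
  unfold getTeam
  rw [hk]; dsimp only
  obtain ⟨m, rfl⟩ : ∃ m, k = m + 1 := ⟨k - 1, by omega⟩
  have hm : m < data.length := Nat.lt_of_succ_lt hklt
  have hnom : ∀ j, 1 ≤ j → j ≤ m → data.getD j "" ≠ "Team A" ∧ data.getD j "" ≠ "Team B" := by
    intro j h1 h2
    have := hnone j (List.mem_range.mpr (by omega))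
    simp [Nat.pos_iff_ne_zero.mp h1] at this
    exact ⟨by simpa using this.1, by simpa using this.2⟩
  have hl : getTeamLoopA data m = none := loopA_none_of data m hnom
  rw [bCore_eq_loopA data m hm]
  simp only [Nat.succ_sub_one, hl]
  rcases (by simpa using hmark : data.getD 0 "" = "Team A" ∨ data.getD 0 "" = "Team B") with h0 | h0 <;>
    simp only [List.getD] at h0 <;> simp [mark, h0]
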